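-- pv_equiv track=rewrite | github.com/xl666/recursosEstructuras24 | parcial2/codigos/tema10/contarCeros.py | contar_ceros2_rec
-- ===== SOURCE A (Python) =====
-- def contar_ceros2_rec(cadena, contador):
--     if not cadena:
--         return contador
--     frente = cadena[0]
--     resto = cadena[1:]
--
--     if frente == '0':
--         return contar_ceros2_rec(resto, contador + 1)
--     else:
--         return contar_ceros2_rec(resto, contador)
-- ===== SOURCE B (Python) =====
-- def contar_ceros2_rec(cadena, contador):
--     if not cadena:
--         return contador
--     for c in cadena:
--         if c == '0':
--             contador += 1
--     return contador
-- ===== Notes on version B (the rewrite author's own statement) =====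
-- stated objective: simpler
-- what changed: Replaced the tail recursion that rebuilds the remaining string via slicing at each step with a single iterative scan accumulating the counter in place.
import Mathlib
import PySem

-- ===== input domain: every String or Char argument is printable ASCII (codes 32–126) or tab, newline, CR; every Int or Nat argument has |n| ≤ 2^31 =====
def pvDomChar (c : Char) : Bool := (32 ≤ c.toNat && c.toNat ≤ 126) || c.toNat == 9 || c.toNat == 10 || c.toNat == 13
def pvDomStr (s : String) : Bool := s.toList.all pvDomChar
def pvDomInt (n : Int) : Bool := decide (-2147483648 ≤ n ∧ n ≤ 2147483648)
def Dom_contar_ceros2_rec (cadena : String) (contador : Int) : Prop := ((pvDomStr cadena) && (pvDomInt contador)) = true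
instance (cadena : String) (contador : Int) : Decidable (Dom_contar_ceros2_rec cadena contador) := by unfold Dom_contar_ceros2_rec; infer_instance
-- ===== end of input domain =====

-- B replaces A's tail recursion (which re-slices the string each step) with one iterative scan; simpler and no repeated slicing.

-- ===== PORT A =====
-- A's recursion: empty → contador; else split head/tail and recurse with contador (+1 if head = '0').
def contarA : List Char → Int → Int
  | [], contador => contador
  | frente :: resto, contador =>
      if frente = '0' then contarA resto (contador + 1) else contarA resto contador

def contar_ceros2_rec (cadena : String) (contador : Int) : Int :=
  contarA cadena.toList contador

-- ===== PORT B =====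
-- B: guard on empty string, then a fold over the characters accumulating contador in place.
def contar_ceros2_rec_alt (cadena : String) (contador : Int) : Int :=
  if cadena.toList = [] then contador
  else cadena.toList.foldl (fun acc c => if c = '0' then acc + 1 else acc) contador

-- ===== PRECONDITION & SPEC =====
def Spec_contar_ceros2_rec (cadena : String) (contador : Int) (out : Int) : Prop := out = contar_ceros2_rec_alt cadena contador
instance (cadena : String) (contador : Int) (out : Int) : Decidable (Spec_contar_ceros2_rec cadena contador out) := by unfold Spec_contar_ceros2_rec; infer_instance

-- ===== CLAIM (what is proved, stated in full; the proofs are below) =====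
def Claim_equal_contar_ceros2_rec : Prop := ∀ (cadena : String) (contador : Int), Dom_contar_ceros2_rec cadena contador → Spec_contar_ceros2_rec cadena contador (contar_ceros2_rec cadena contador)

-- ===== LEMMAS AND PROOFS =====
theorem contarA_eq_foldl (l : List Char) (contador : Int) :
    contarA l contador = l.foldl (fun acc c => if c = '0' then acc + 1 else acc) contador := by
  induction l generalizing contador with
  | nil => rfl
  | cons h t ih =>
      simp only [contarA, List.foldl]
      by_cases hz : h = '0' <;> simp [hz, ih]

-- ===== VERDICT (by name: the statement is the Claim_ definition above) =====
theorem contar_ceros2_rec_spec : Claim_equal_contar_ceros2_rec := by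
  intro cadena contador _
  unfold Spec_contar_ceros2_rec contar_ceros2_rec contar_ceros2_rec_alt
  by_cases h : cadena.toList = [] <;> simp [h, contarA_eq_foldl]
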